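-- pv_equiv track=rewrite | github.com/Liam-Deacon/CLEED | tools/benchmarks/plot_benchmarks.py | best_so_far
-- ===== SOURCE A (Python) =====
-- def best_so_far(points):
--     best = []
--     current = None
--     for eval_idx, value in points:
--         if current is None or value < current:
--             current = value
--         best.append((eval_idx, current))
--     return best
-- ===== SOURCE B (Python) =====
-- def best_so_far(points):
--     vals = [v for _, v in points]
--     return [(e, min(vals[:i + 1])) for i, (e, _) in enumerate(points)]
-- ===== Notes on version B (the rewrite author's own statement) =====
-- stated objective: alternative
-- what changed: Replaced the single pass carrying an Optional running-minimum accumulator by a per-index recomputation: for each position i take min over the prefix slice vals[:i+1] (no running state at all, quadratic instead of linear).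
import Mathlib
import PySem

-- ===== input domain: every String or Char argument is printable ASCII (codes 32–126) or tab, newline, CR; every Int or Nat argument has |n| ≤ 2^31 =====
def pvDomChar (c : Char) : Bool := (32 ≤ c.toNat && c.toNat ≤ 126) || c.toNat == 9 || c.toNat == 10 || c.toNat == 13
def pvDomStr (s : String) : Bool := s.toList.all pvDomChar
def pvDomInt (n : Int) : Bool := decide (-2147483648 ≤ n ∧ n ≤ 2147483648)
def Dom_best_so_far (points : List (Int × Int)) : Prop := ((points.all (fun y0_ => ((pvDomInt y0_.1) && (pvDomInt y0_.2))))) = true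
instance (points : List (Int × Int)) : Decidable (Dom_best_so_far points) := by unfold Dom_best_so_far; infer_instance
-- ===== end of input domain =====

-- B drops A's running-minimum accumulator and instead recomputes, per index, min over the prefix slice (alternative algorithm, quadratic).

-- ===== PORT A =====
-- literal port of A's loop: state = (best list so far, current : Option Int)
def best_so_far (points : List (Int × Int)) : List (Int × Int) :=
  (points.foldl
    (fun (st : List (Int × Int) × Option Int) p =>
      let cur : Int :=
        match st.2 with
        | none => p.2
        | some c => if p.2 < c then p.2 else c
      (st.1 ++ [(p.1, cur)], some cur))
    ([], none)).1

-- ===== PORT B =====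
-- Python's min over a nonempty int list (the [] case is unreachable: slices vals[:i+1] are nonempty)
def pyMinInt : List Int → Int
  | [] => 0
  | v :: vs => vs.foldl min v

def best_so_far_alt (points : List (Int × Int)) : List (Int × Int) :=
  let vals := points.map (·.2)
  points.zipIdx.map (fun pi => (pi.1.1, pyMinInt (vals.take (pi.2 + 1))))

-- ===== PRECONDITION & SPEC =====
def Spec_best_so_far (points : List (Int × Int)) (out : List (Int × Int)) : Prop := out = best_so_far_alt points
instance (points : List (Int × Int)) (out : List (Int × Int)) : Decidable (Spec_best_so_far points out) := by unfold Spec_best_so_far; infer_instance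

-- ===== CLAIM (what is proved, stated in full; the proofs are below) =====
def Claim_equal_best_so_far : Prop := ∀ (points : List (Int × Int)), Dom_best_so_far points → Spec_best_so_far points (best_so_far points)

-- ===== LEMMAS AND PROOFS =====

-- running-minimum list, the common intermediate form
def pvAccMinGo (c : Int) : List Int → List Int
  | [] => []
  | v :: vs => let m := min c v; m :: pvAccMinGo m vs

def pvAccMin : List Int → List Int
  | [] => []
  | v :: vs => v :: pvAccMinGo v vs

-- A's fold, started after a first element with current = some c, appends the zipped running minima
theorem pv_fold_some (points : List (Int × Int)) :
    ∀ (acc : List (Int × Int)) (c : Int),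
      (points.foldl
        (fun (st : List (Int × Int) × Option Int) p =>
          let cur : Int :=
            match st.2 with
            | none => p.2
            | some c => if p.2 < c then p.2 else c
          (st.1 ++ [(p.1, cur)], some cur))
        (acc, some c)).1
      = acc ++ (points.map (·.1)).zip (pvAccMinGo c (points.map (·.2))) := by
  induction points with
  | nil => intro acc c; simp [pvAccMinGo]
  | cons p ps ih =>
      intro acc c
      simp only [List.foldl_cons, List.map_cons, pvAccMinGo]
      have hmin : (if p.2 < c then p.2 else c) = min c p.2 := by
        rcases lt_or_ge p.2 c with h | h
        · rw [if_pos h]; omega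
        · rw [if_neg (not_lt.mpr h)]; omega
      rw [hmin] at *
      rw [ih]
      simp

theorem pv_A_eq_mid (points : List (Int × Int)) :
    best_so_far points = (points.map (·.1)).zip (pvAccMin (points.map (·.2))) := by
  unfold best_so_far
  cases points with
  | nil => simp [pvAccMin]
  | cons p ps =>
      simp only [List.foldl_cons, List.map_cons, pvAccMin]
      rw [pv_fold_some]
      simp

theorem pvAccMinGo_length (c : Int) (vs : List Int) : (pvAccMinGo c vs).length = vs.length := by
  induction vs generalizing c with
  | nil => simp [pvAccMinGo]
  | cons v vs ih => simp [pvAccMinGo, ih]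

theorem pvAccMin_length (vs : List Int) : (pvAccMin vs).length = vs.length := by
  cases vs with
  | nil => rfl
  | cons v vs => simp [pvAccMin, pvAccMinGo_length]

theorem pvAccMinGo_getElem (vs : List Int) :
    ∀ (c : Int) (i : Nat) (h : i < vs.length),
      (pvAccMinGo c vs)[i]'(by rw [pvAccMinGo_length]; exact h)
        = (vs.take (i + 1)).foldl min c := by
  induction vs with
  | nil => intro c i h; simp at h
  | cons v vs ih =>
      intro c i h
      cases i with
      | zero => simp [pvAccMinGo]
      | succ i =>
          simp only [pvAccMinGo, List.getElem_cons_succ, List.take_succ_cons, List.foldl_cons]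
          exact ih (min c v) i (by simpa using h)

theorem pvAccMin_getElem (vs : List Int) (i : Nat) (h : i < vs.length) :
    (pvAccMin vs)[i]'(by rw [pvAccMin_length]; exact h) = pyMinInt (vs.take (i + 1)) := by
  cases vs with
  | nil => simp at h
  | cons v vs =>
      cases i with
      | zero => simp [pvAccMin, pyMinInt]
      | succ i =>
          simp only [pvAccMin, List.getElem_cons_succ, List.take_succ_cons, pyMinInt]
          exact pvAccMinGo_getElem vs v i (by simpa using h)

theorem pv_B_eq_mid (points : List (Int × Int)) :
    best_so_far_alt points = (points.map (·.1)).zip (pvAccMin (points.map (·.2))) := by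
  unfold best_so_far_alt
  apply List.ext_getElem
  · simp [pvAccMin_length]
  · intro i h1 h2
    have hi : i < points.length := by simpa using h1
    have hz : (points.zipIdx)[i]'(by simpa using hi) = (points[i]'hi, i) := by
      simp [List.getElem_zipIdx]
    simp only [List.getElem_map, hz, List.getElem_zip, List.getElem_map]
    rw [pvAccMin_getElem (points.map (·.2)) i (by simpa using hi)]

-- ===== VERDICT (by name: the statement is the Claim_ definition above) =====
theorem best_so_far_spec : Claim_equal_best_so_far := by
  intro points _
  show best_so_far points = best_so_far_alt points
  rw [pv_A_eq_mid, pv_B_eq_mid]
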